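-- pv_equiv track=rewrite | github.com/Mimix231/sm64dx | ai_tools/remove_code.py | include_trailing_semicolon_and_space
-- ===== SOURCE A (Python) =====
-- def include_trailing_semicolon_and_space(text: str, index: int) -> int:
--     i = index
--     while i < len(text) and text[i] in " \t":
--         i += 1
--     if i < len(text) and text[i] == ";":
--         i += 1
--     while i < len(text) and text[i] in " \t":
--         i += 1
--     if i < len(text) and text[i] == "\r":
--         i += 1
--     if i < len(text) and text[i] == "\n":
--         i += 1
--     return i
-- ===== SOURCE B (Python) =====
-- def include_trailing_semicolon_and_space(text: str, index: int) -> int: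
--     n = len(text)
--     pos = index + n if index < 0 else index
--     if pos >= n:
--         return index
--     t = text[pos:].lstrip(" \t")
--     if t.startswith(";"):
--         t = t[1:].lstrip(" \t")
--     if t.startswith("\r"):
--         t = t[1:]
--     if t.startswith("\n"):
--         t = t[1:]
--     return n - len(t)
-- ===== Notes on version B (the rewrite author's own statement) =====
-- stated objective: idiomatic
-- what changed: B replaces A's five index-stepping loops/conditionals by suffix-string operations (lstrip/startswith on text[pos:]) and returns len(text) minus the leftover length; negative indices are normalised to len(text)+index instead of A's per-access wraparound.
-- intended difference: For -len(text) <= index < 0 A scans with Python's per-access negative-index wraparound and returns an accidental (possibly negative, or start-of-string) position, while B treats the index as position len(text)+index and returns the intended absolute end position, e.g. A('a \n', -2) = 0 but B returns 3. — e.g. on include_trailing_semicolon_and_space("a \n", -2): A returns 0, B returns 3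
import Mathlib
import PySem

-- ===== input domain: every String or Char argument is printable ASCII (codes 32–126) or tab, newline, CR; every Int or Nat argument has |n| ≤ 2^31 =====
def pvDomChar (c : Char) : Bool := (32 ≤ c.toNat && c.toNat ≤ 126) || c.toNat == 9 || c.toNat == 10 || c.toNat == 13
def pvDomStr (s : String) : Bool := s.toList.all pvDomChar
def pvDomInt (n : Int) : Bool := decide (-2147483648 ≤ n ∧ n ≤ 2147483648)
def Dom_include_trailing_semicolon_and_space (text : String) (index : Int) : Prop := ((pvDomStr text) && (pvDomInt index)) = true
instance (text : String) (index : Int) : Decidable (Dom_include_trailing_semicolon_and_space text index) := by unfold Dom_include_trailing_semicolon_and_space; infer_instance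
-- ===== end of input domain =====

-- B replaces A's five index loops/conditionals by lstrip/startswith on the suffix (idiomatic);
-- on negative indices (see D_) B normalises the position instead of reproducing A's wraparound scan.

-- ===== PORT A =====
-- 'while i < len(text) and text[i] in " \t": i += 1' (wraparound access via pyGet?; on IndexError — outside Pre_ — the port stops)
-- fuel is a totality device only: pvASkipWSFuel is always called with enough fuel to finish the scan
def pvASkipWSFuel (cs : List Char) (i : Int) : Nat → Int
  | 0 => i
  | fuel + 1 =>
    if i < cs.length then
      match PySem.List.pyGet? cs i with
      | some c => if c == ' ' || c == '\t' then pvASkipWSFuel cs (i + 1) fuel else i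
      | none => i
    else i

def pvASkipWS (cs : List Char) (i : Int) : Int :=
  pvASkipWSFuel cs i (cs.length - i).toNat

def include_trailing_semicolon_and_space (text : String) (index : Int) : Int :=
  let cs := text.toList
  let i1 := pvASkipWS cs index
  let i2 := if i1 < cs.length ∧ PySem.List.pyGet? cs i1 = some ';' then i1 + 1 else i1
  let i3 := pvASkipWS cs i2
  let i4 := if i3 < cs.length ∧ PySem.List.pyGet? cs i3 = some '\r' then i3 + 1 else i3
  let i5 := if i4 < cs.length ∧ PySem.List.pyGet? cs i4 = some '\n' then i4 + 1 else i4
  i5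

-- ===== PORT B =====
def pvWsB (c : Char) : Bool := c == ' ' || c == '\t'

def include_trailing_semicolon_and_space_alt (text : String) (index : Int) : Int :=
  let cs := text.toList
  let n : Int := cs.length
  let pos := if index < 0 then index + n else index
  if pos ≥ n then index
  else
    -- t = text[pos:].lstrip(" \t")   (startswith(c) ported as head? = some c, t[1:] as tail)
    let t1 := (PySem.List.slice cs (some pos) none).dropWhile pvWsB
    -- if t.startswith(";"): t = t[1:].lstrip(" \t")
    let t2 := if t1.head? = some ';' then t1.tail.dropWhile pvWsB else t1
    -- if t.startswith("\r"): t = t[1:]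
    let t3 := if t2.head? = some '\r' then t2.tail else t2
    -- if t.startswith("\n"): t = t[1:]
    let t4 := if t3.head? = some '\n' then t3.tail else t3
    n - t4.length

-- ===== PRECONDITION & SPEC =====
-- A raises IndexError exactly when index < -len(text); those inputs are excluded.
def Pre_include_trailing_semicolon_and_space (text : String) (index : Int) : Prop :=
  -(text.toList.length : Int) ≤ index
instance (text : String) (index : Int) : Decidable (Pre_include_trailing_semicolon_and_space text index) := by
  unfold Pre_include_trailing_semicolon_and_space; infer_instance

def pvWitness_include_trailing_semicolon_and_space : String × Int := ("x = 1 ; \r\n", 5)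

-- On -len(text) ≤ index < 0, A scans with Python's per-access negative-index wraparound (possibly re-reading
-- the start of the string and returning a meaningless, even negative, position), while B interprets the
-- negative index as the position len(text)+index and returns the intended absolute end position.
def D_include_trailing_semicolon_and_space (text : String) (index : Int) : Prop :=
  -(text.toList.length : Int) ≤ index ∧ index < 0
instance (text : String) (index : Int) : Decidable (D_include_trailing_semicolon_and_space text index) := by
  unfold D_include_trailing_semicolon_and_space; infer_instance

def Spec_include_trailing_semicolon_and_space (text : String) (index : Int) (out : Int) : Prop :=
  ¬ D_include_trailing_semicolon_and_space text index → out = include_trailing_semicolon_and_space_alt text index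
instance (text : String) (index : Int) (out : Int) : Decidable (Spec_include_trailing_semicolon_and_space text index out) := by
  unfold Spec_include_trailing_semicolon_and_space; infer_instance

def pvDiffWitness_include_trailing_semicolon_and_space : String × Int := ("a \n", -2)
def pvDiffWitnessOut_include_trailing_semicolon_and_space : Int × Int := (0, 3)

-- ===== CLAIM (what is proved, stated in full; the proofs are below) =====
def Claim_unchanged_include_trailing_semicolon_and_space : Prop := ∀ (text : String) (index : Int), Dom_include_trailing_semicolon_and_space text index → Pre_include_trailing_semicolon_and_space text index → Spec_include_trailing_semicolon_and_space text index (include_trailing_semicolon_and_space text index)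
def Claim_changed_include_trailing_semicolon_and_space : Prop := Dom_include_trailing_semicolon_and_space (pvDiffWitness_include_trailing_semicolon_and_space.1) (pvDiffWitness_include_trailing_semicolon_and_space.2) ∧ Pre_include_trailing_semicolon_and_space (pvDiffWitness_include_trailing_semicolon_and_space.1) (pvDiffWitness_include_trailing_semicolon_and_space.2) ∧ D_include_trailing_semicolon_and_space (pvDiffWitness_include_trailing_semicolon_and_space.1) (pvDiffWitness_include_trailing_semicolon_and_space.2) ∧ include_trailing_semicolon_and_space (pvDiffWitness_include_trailing_semicolon_and_space.1) (pvDiffWitness_include_trailing_semicolon_and_space.2) = pvDiffWitnessOut_include_trailing_semicolon_and_space.1 ∧ include_trailing_semicolon_and_space_alt (pvDiffWitness_include_trailing_semicolon_and_space.1) (pvDiffWitness_include_trailing_semicolon_and_space.2) = pvDiffWitnessOut_include_trailing_semicolon_and_space.2 ∧ pvDiffWitnessOut_include_trailing_semicolon_and_space.1 ≠ pvDiffWitnessOut_include_trailing_semicolon_and_space.2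

-- ===== LEMMAS AND PROOFS =====

theorem pvDrop_length_takeWhile (t : List Char) (p : Char → Bool) :
    t.drop (t.takeWhile p).length = t.dropWhile p := by
  induction t with
  | nil => rfl
  | cons a l ih => by_cases h : p a <;> simp [h, ih]

theorem pvASkipWSFuel_spec (fuel : Nat) (cs : List Char) (i : Int) (h0 : 0 ≤ i)
    (hf : (cs.length - i).toNat ≤ fuel) :
    pvASkipWSFuel cs i fuel = i + ((cs.drop i.toNat).takeWhile pvWsB).length := by
  induction fuel generalizing i with
  | zero =>
    have hge : cs.length ≤ i.toNat := by omega
    rw [List.drop_eq_nil_of_le hge]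
    simp [pvASkipWSFuel]
  | succ fuel ih =>
    rw [pvASkipWSFuel]
    by_cases hlt : i < (cs.length : Int)
    · have hnat : i.toNat < cs.length := by omega
      rw [if_pos hlt, PySem.List.pyGet?_of_nonneg cs h0,
        List.getElem?_eq_getElem hnat, List.drop_eq_getElem_cons hnat]
      dsimp only
      by_cases hws : pvWsB cs[i.toNat]
      · rw [List.takeWhile_cons_of_pos hws]
        simp only [pvWsB] at hws
        rw [if_pos hws]
        have h1 : (i + 1).toNat = i.toNat + 1 := by omega
        rw [ih (i + 1) (by omega) (by omega), h1]
        simp only [List.length_cons]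
        omega
      · rw [List.takeWhile_cons_of_neg hws]
        simp only [pvWsB] at hws
        rw [if_neg hws]
        simp
    · rw [if_neg hlt, List.drop_eq_nil_of_le (by omega)]
      simp

theorem pvASkipWS_spec (cs : List Char) (i : Int) (h0 : 0 ≤ i) :
    pvASkipWS cs i = i + ((cs.drop i.toNat).takeWhile pvWsB).length :=
  pvASkipWSFuel_spec _ cs i h0 le_rfl

-- after a whitespace skip: value, suffix and bounds of the new index
theorem pvSkip_suffix (cs : List Char) (i : Int) (t : List Char) (h0 : 0 ≤ i) (hle : i ≤ cs.length)
    (ht : cs.drop i.toNat = t) :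
    cs.drop (pvASkipWS cs i).toNat = t.dropWhile pvWsB ∧
    0 ≤ pvASkipWS cs i ∧ pvASkipWS cs i ≤ cs.length := by
  have hsp := pvASkipWS_spec cs i h0
  rw [ht] at hsp
  have hlt := (t.takeWhile_sublist pvWsB).length_le
  have hlen : t.length = cs.length - i.toNat := by rw [← ht, List.length_drop]
  refine ⟨?_, by omega, by omega⟩
  have htn : (pvASkipWS cs i).toNat = i.toNat + (t.takeWhile pvWsB).length := by omega
  rw [htn, ← List.drop_drop, ht, pvDrop_length_takeWhile]

-- A's guarded char test equals a head? test on the current suffix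
theorem pvCond_iff (cs t : List Char) (i : Int) (c : Char) (h0 : 0 ≤ i)
    (ht : cs.drop i.toNat = t) :
    (i < (cs.length : Int) ∧ PySem.List.pyGet? cs i = some c) ↔ t.head? = some c := by
  subst ht
  rw [PySem.List.pyGet?_of_nonneg cs h0, ← List.head?_drop]
  constructor
  · exact fun h => h.2
  · intro h
    refine ⟨?_, h⟩
    by_contra hge
    rw [List.drop_eq_nil_of_le (by omega)] at h
    simp at h

theorem pvDrop_succ (cs t : List Char) (i : Int) (h0 : 0 ≤ i) (ht : cs.drop i.toNat = t) :
    cs.drop (i + 1).toNat = t.tail := by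
  have h1 : (i + 1).toNat = i.toNat + 1 := by omega
  rw [h1, ← List.drop_drop, ht, List.drop_one]

-- one optional-character step of A equals a head?/tail step on the suffix
theorem pvCharStep (cs t : List Char) (i : Int) (c : Char) (h0 : 0 ≤ i)
    (hle : i ≤ (cs.length : Int)) (ht : cs.drop i.toNat = t) :
    cs.drop (if i < (cs.length : Int) ∧ PySem.List.pyGet? cs i = some c then i + 1 else i).toNat
        = (if t.head? = some c then t.tail else t) ∧
      (0 : Int) ≤ (if i < (cs.length : Int) ∧ PySem.List.pyGet? cs i = some c then i + 1 else i) ∧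
      (if i < (cs.length : Int) ∧ PySem.List.pyGet? cs i = some c then i + 1 else i) ≤ (cs.length : Int) := by
  by_cases h : t.head? = some c
  · have hc := (pvCond_iff cs t i c h0 ht).mpr h
    rw [if_pos hc, if_pos h]
    exact ⟨pvDrop_succ cs t i h0 ht, by omega, by have := hc.1; omega⟩
  · have hc : ¬ (i < (cs.length : Int) ∧ PySem.List.pyGet? cs i = some c) :=
      fun hx => h ((pvCond_iff cs t i c h0 ht).mp hx)
    rw [if_neg hc, if_neg h]
    exact ⟨ht, h0, hle⟩

-- a position whose suffix is u IS cs.length - u.length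
theorem pvFinal (cs u : List Char) (j : Int) (h0 : 0 ≤ j) (hle : j ≤ (cs.length : Int))
    (hu : cs.drop j.toNat = u) : j = (cs.length : Int) - u.length := by
  have hlen : u.length = cs.length - j.toNat := by rw [← hu, List.length_drop]
  omega

-- A's whole index chain, started inside the string, computes B's suffix arithmetic
theorem pvChain (cs : List Char) (i : Int) (t : List Char) (h0 : 0 ≤ i)
    (hle : i ≤ (cs.length : Int)) (ht : cs.drop i.toNat = t) :
    (let i1 := pvASkipWS cs i
     let i2 := if i1 < (cs.length : Int) ∧ PySem.List.pyGet? cs i1 = some ';' then i1 + 1 else i1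
     let i3 := pvASkipWS cs i2
     let i4 := if i3 < (cs.length : Int) ∧ PySem.List.pyGet? cs i3 = some '\r' then i3 + 1 else i3
     let i5 := if i4 < (cs.length : Int) ∧ PySem.List.pyGet? cs i4 = some '\n' then i4 + 1 else i4
     i5) =
    (let t1 := t.dropWhile pvWsB
     let t2 := if t1.head? = some ';' then t1.tail.dropWhile pvWsB else t1
     let t3 := if t2.head? = some '\r' then t2.tail else t2
     let t4 := if t3.head? = some '\n' then t3.tail else t3
     ((cs.length : Int) - t4.length)) := by
  obtain ⟨hd1, hnn1, hle1⟩ := pvSkip_suffix cs i t h0 hle ht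
  obtain ⟨hd2, hnn2, hle2⟩ := pvCharStep cs (t.dropWhile pvWsB) (pvASkipWS cs i) ';' hnn1 hle1 hd1
  obtain ⟨hd3, hnn3, hle3⟩ := pvSkip_suffix cs _ _ hnn2 hle2 hd2
  have hdw : (if (t.dropWhile pvWsB).head? = some ';' then (t.dropWhile pvWsB).tail
        else t.dropWhile pvWsB).dropWhile pvWsB
      = (if (t.dropWhile pvWsB).head? = some ';' then (t.dropWhile pvWsB).tail.dropWhile pvWsB
        else t.dropWhile pvWsB) := by
    split
    · rfl
    · exact List.dropWhile_idempotent _ _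
  rw [hdw] at hd3
  obtain ⟨hd4, hnn4, hle4⟩ := pvCharStep cs _ _ '\r' hnn3 hle3 hd3
  obtain ⟨hd5, hnn5, hle5⟩ := pvCharStep cs _ _ '\n' hnn4 hle4 hd4
  exact pvFinal cs _ _ hnn5 hle5 hd5

theorem pvAB_eq (text : String) (index : Int) (h0 : 0 ≤ index) :
    include_trailing_semicolon_and_space text index
      = include_trailing_semicolon_and_space_alt text index := by
  by_cases hbig : (text.toList.length : Int) ≤ index
  · have h1 : pvASkipWS text.toList index = index := by
      rw [pvASkipWS_spec _ _ h0, List.drop_eq_nil_of_le (by omega)]; simp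
    have hc : ∀ (c : Char), ¬ (index < (text.toList.length : Int) ∧
        PySem.List.pyGet? text.toList index = some c) := fun c h => absurd h.1 (by omega)
    simp only [include_trailing_semicolon_and_space, include_trailing_semicolon_and_space_alt,
      h1, if_neg (hc ';'), if_neg (hc '\r'), if_neg (hc '\n'),
      if_neg (show ¬ index < 0 by omega), if_pos (show index ≥ (text.toList.length : Int) from hbig)]
  · rw [not_le] at hbig
    have hchain := pvChain text.toList index (text.toList.drop index.toNat) h0 (by omega) rfl
    simp only [include_trailing_semicolon_and_space, include_trailing_semicolon_and_space_alt]
    rw [if_neg (show ¬ index < 0 by omega),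
      if_neg (show ¬ index ≥ (text.toList.length : Int) by omega),
      show index = ((index.toNat : Nat) : Int) from (Int.toNat_of_nonneg h0).symm,
      PySem.List.slice_from_natCast, Int.toNat_of_nonneg h0]
    exact hchain

-- ===== VERDICT (by name: the statement is the Claim_ definition above) =====
theorem include_trailing_semicolon_and_space_spec : Claim_unchanged_include_trailing_semicolon_and_space := by
  intro text index _ hpre hnd
  unfold Pre_include_trailing_semicolon_and_space at hpre
  unfold D_include_trailing_semicolon_and_space at hnd
  exact pvAB_eq text index (by by_cases h : index < 0 <;> [exact absurd ⟨hpre, h⟩ hnd; omega])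

theorem include_trailing_semicolon_and_space_changed : Claim_changed_include_trailing_semicolon_and_space := by
  unfold Claim_changed_include_trailing_semicolon_and_space
  decide
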